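-- pv_equiv track=rewrite | github.com/BlackWaterPark0011010111/Python | Basic/Regex/my.py | make_happy
-- ===== SOURCE A (Python) =====
-- def make_happy(sentence):
--     result = []
--     for char in sentence:
--         if char in [":", "8", "x", ";"]:
--             result.append(char)
--         elif char == "(" and result and result[-1] in [":", "8", "x", ";"]:
--             result[-1] = result[-1] + ")"
--         else:
--             result.append(char)
--     return ''.join(result)
-- ===== SOURCE B (Python) =====
-- import re
--
-- def make_happy(sentence):
--     return re.sub(r'([:8x;])\(', r'\1)', sentence)
-- ===== Notes on version B (the rewrite author's own statement) =====
-- stated objective: idiomatic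
-- what changed: A's list accumulator with last-element mutation is replaced by a single regex substitution re.sub(r'([:8x;])\(', r'\1)', sentence), whose left-to-right non-overlapping matching reproduces A's merge exactly.
import Mathlib
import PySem

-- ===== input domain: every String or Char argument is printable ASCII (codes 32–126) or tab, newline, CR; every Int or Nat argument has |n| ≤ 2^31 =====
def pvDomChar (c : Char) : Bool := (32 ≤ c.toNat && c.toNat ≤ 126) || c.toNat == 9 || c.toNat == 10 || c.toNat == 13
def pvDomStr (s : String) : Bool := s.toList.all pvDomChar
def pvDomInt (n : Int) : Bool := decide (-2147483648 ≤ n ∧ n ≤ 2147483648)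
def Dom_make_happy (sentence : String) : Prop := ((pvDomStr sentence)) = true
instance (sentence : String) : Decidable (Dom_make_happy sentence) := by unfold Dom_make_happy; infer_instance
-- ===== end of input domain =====

-- B replaces A's accumulator loop (with last-element mutation) by a single regex
-- substitution re.sub(r'([:8x;])\(', r'\1)', sentence); objective: idiomatic.

-- ===== PORT A =====
-- A's loop state: result, a list of strings; a '(' after a face string is merged
-- into that last element (result[-1] = result[-1] + ")").
def pvALoop : List String → List Char → List String
  | res, [] => res
  | res, c :: cs =>
    if c ∈ [':', '8', 'x', ';'] then pvALoop (res ++ [String.singleton c]) cs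
    else if c = '(' ∧ res ≠ [] ∧
        ((PySem.List.pyGet? res (-1)).getD "" ∈ [":", "8", "x", ";"]) then
      pvALoop (res.dropLast ++ [(PySem.List.pyGet? res (-1)).getD "" ++ ")"]) cs
    else pvALoop (res ++ [String.singleton c]) cs

def make_happy (sentence : String) : String :=
  String.join (pvALoop [] sentence.toList)

-- ===== PORT B =====
-- Hand port of re.sub(r'([:8x;])\(', r'\1)', s) for this fixed two-character
-- pattern: a single left-to-right non-overlapping scan; exact for this regex.
def pvBGo : List Char → List Char
  | [] => []
  | [c] => [c]
  | c :: d :: rest =>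
    if c ∈ [':', '8', 'x', ';'] ∧ d = '(' then c :: ')' :: pvBGo rest
    else c :: pvBGo (d :: rest)

def make_happy_alt (sentence : String) : String :=
  String.ofList (pvBGo sentence.toList)

-- ===== PRECONDITION & SPEC =====
def Spec_make_happy (sentence : String) (out : String) : Prop := out = make_happy_alt sentence
instance (sentence : String) (out : String) : Decidable (Spec_make_happy sentence out) := by unfold Spec_make_happy; infer_instance

-- ===== CLAIM (what is proved, stated in full; the proofs are below) =====
def Claim_equal_make_happy : Prop := ∀ (sentence : String), Dom_make_happy sentence → Spec_make_happy sentence (make_happy sentence)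

-- ===== LEMMAS AND PROOFS =====

-- Reference single scan over chars; b records whether the previous output
-- element of A's loop is a bare face string.
def pvG : Bool → List Char → List Char
  | _, [] => []
  | b, c :: cs =>
    if c ∈ [':', '8', 'x', ';'] then c :: pvG true cs
    else if c = '(' ∧ b then ')' :: pvG false cs
    else c :: pvG false cs

def pvLastFace (res : List String) : Bool :=
  match res.getLast? with
  | some s => decide (s ∈ [":", "8", "x", ";"])
  | none => false

theorem pvSingleton_mem_iff (c : Char) :
    String.singleton c ∈ [":", "8", "x", ";"] ↔ c ∈ [':', '8', 'x', ';'] := by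
  constructor
  · intro h
    simp only [List.mem_cons, List.not_mem_nil, or_false] at h
    rcases h with h | h | h | h <;>
      · have := congrArg String.toList h
        simp at this
        simp [this]
  · intro h
    simp only [List.mem_cons, List.not_mem_nil, or_false] at h
    rcases h with h | h | h | h <;> subst h <;> decide

theorem pvFace_decide (c : Char) :
    decide (String.singleton c ∈ [":", "8", "x", ";"]) =
      decide (c ∈ [':', '8', 'x', ';']) := by
  simp only [decide_eq_decide]; exact pvSingleton_mem_iff c

theorem pvLastFace_concat (res : List String) (s : String) :
    pvLastFace (res ++ [s]) = decide (s ∈ [":", "8", "x", ";"]) := by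
  simp [pvLastFace]

theorem pvLastFace_spec (res : List String) (h : pvLastFace res = true) :
    res ≠ [] ∧ (PySem.List.pyGet? res (-1)).getD "" ∈ [":", "8", "x", ";"] := by
  unfold pvLastFace at h
  rcases hl : res.getLast? with _ | s
  · rw [hl] at h; simp at h
  · rw [hl] at h
    have hne : res ≠ [] := by intro he; subst he; simp at hl
    refine ⟨hne, ?_⟩
    rw [PySem.List.pyGet?_neg_one, hl]
    simpa using h

theorem pvALoop_join (cs : List Char) : ∀ (res : List String),
    (String.join (pvALoop res cs)).toList =
      (String.join res).toList ++ pvG (pvLastFace res) cs := by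
  induction cs with
  | nil => intro res; simp [pvALoop, pvG]
  | cons c cs ih =>
    intro res
    by_cases hc : c ∈ [':', '8', 'x', ';']
    · rw [pvALoop, if_pos hc, ih, pvLastFace_concat, pvFace_decide, decide_eq_true hc,
        pvG, if_pos hc]
      simp
    · by_cases hcond : c = '(' ∧ res ≠ [] ∧
          ((PySem.List.pyGet? res (-1)).getD "" ∈ [":", "8", "x", ";"])
      · obtain ⟨hpc, hne, hmem⟩ := hcond
        have hl : res.getLast? = some (res.getLast hne) :=
          List.getLast?_eq_some_getLast hne
        have hget : (PySem.List.pyGet? res (-1)).getD "" = res.getLast hne := by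
          rw [PySem.List.pyGet?_neg_one, hl]; rfl
        rw [hget] at hmem
        have hb : pvLastFace res = true := by
          unfold pvLastFace; rw [hl]; simpa using hmem
        have hfalse : ¬(res.getLast hne ++ ")" ∈ [":", "8", "x", ";"]) := by
          simp only [List.mem_cons, List.not_mem_nil, or_false] at hmem
          rcases hmem with h | h | h | h <;> rw [h] <;> decide
        rw [pvALoop, if_neg hc, if_pos ⟨hpc, hne, hget ▸ hmem⟩, ih, hget,
          pvLastFace_concat, decide_eq_false hfalse, pvG, if_neg hc,
          if_pos ⟨hpc, hb⟩]
        conv_rhs => rw [← List.dropLast_concat_getLast hne]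
        simp [String.toList_append]
      · have h2 : ¬(c = '(' ∧ pvLastFace res = true) := by
          rintro ⟨hpc, hb⟩
          obtain ⟨hne, hmem⟩ := pvLastFace_spec res hb
          exact hcond ⟨hpc, hne, hmem⟩
        rw [pvALoop, if_neg hc, if_neg hcond, ih, pvLastFace_concat, pvFace_decide,
          decide_eq_false hc, pvG, if_neg hc, if_neg h2]
        simp

theorem pvG_true_eq_false (d : Char) (rest : List Char) (hd : d ≠ '(') :
    pvG true (d :: rest) = pvG false (d :: rest) := by
  simp [pvG, hd]

theorem pvBGo_eq_pvG (cs : List Char) : pvBGo cs = pvG false cs := by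
  induction cs using pvBGo.induct with
  | case1 => rfl
  | case2 c => simp [pvBGo, pvG]
  | case3 c d rest h ih =>
    rw [pvBGo, if_pos h, pvG, if_pos h.1, h.2, pvG,
      if_neg (by decide), if_pos ⟨rfl, rfl⟩, ih]
  | case4 c d rest h ih =>
    rw [pvBGo, if_neg h, ih]
    by_cases hc : c ∈ [':', '8', 'x', ';']
    · have hd : d ≠ '(' := fun hd => h ⟨hc, hd⟩
      conv_rhs => rw [pvG]
      rw [if_pos hc]
      exact congrArg (c :: ·) (pvG_true_eq_false d rest hd).symm
    · conv_rhs => rw [pvG]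
      rw [if_neg hc, if_neg (by simp)]


-- ===== VERDICT (by name: the statement is the Claim_ definition above) =====
theorem make_happy_spec : Claim_equal_make_happy := by
  intro s _
  unfold Spec_make_happy make_happy make_happy_alt
  refine String.toList_inj.mp ?_
  rw [pvALoop_join, pvBGo_eq_pvG]
  simp [pvLastFace]
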